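-- pv_equiv track=rewrite | github.com/ChartinoLabs/Muninn | src/muninn/parsers/ios/show_cdp_neighbors.py | _split_cap_platform
-- ===== SOURCE A (Python) =====
-- def _split_cap_platform(text: str) -> tuple[str | None, str]:
--     """Split capability+platform text into separate fields.
--
--     Capabilities are single letters (R, T, B, S, H, I, r, P, D, C, M, s)
--     at the start. The first multi-character token starts the platform.
--     """
--     text = text.strip()
--     if not text:
--         return None, ""
--
--     tokens = text.split()
--     cap_tokens: list[str] = []
--
--     for i, token in enumerate(tokens):
--         if len(token) == 1 and token.isalpha():
--             cap_tokens.append(token)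
--         else:
--             platform = " ".join(tokens[i:])
--             capabilities = " ".join(cap_tokens) if cap_tokens else None
--             return capabilities, platform
--
--     # All tokens are single letters (capabilities only, no platform)
--     return " ".join(cap_tokens), ""
-- ===== SOURCE B (Python) =====
-- def _split_cap_platform(text: str) -> tuple[str | None, str]:
--     """Single fold over the tokens with two string accumulators.
--
--     Each token is appended directly onto the growing capabilities string
--     while the platform accumulator is still empty (None) and the token is a
--     single letter; every later token is appended onto the platform string.
--     No split index is ever computed and no token list is sliced or joined.
--     """
--     caps = plat = None
--     for tok in text.strip().split():
--         if plat is None and len(tok) == 1 and tok.isalpha():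
--             caps = tok if caps is None else caps + " " + tok
--         else:
--             plat = tok if plat is None else plat + " " + tok
--     return caps, "" if plat is None else plat
-- ===== Notes on version B (the rewrite author's own statement) =====
-- stated objective: alternative
-- what changed: A finds the index of the first non-single-letter token and then slices the token list and joins the two slices; B never computes a split point or slices: it is a single fold over the tokens carrying two optional string accumulators (caps, plat), appending each token directly onto the capabilities string while plat is still unset and onto the platform string afterwards.
import Mathlib
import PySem

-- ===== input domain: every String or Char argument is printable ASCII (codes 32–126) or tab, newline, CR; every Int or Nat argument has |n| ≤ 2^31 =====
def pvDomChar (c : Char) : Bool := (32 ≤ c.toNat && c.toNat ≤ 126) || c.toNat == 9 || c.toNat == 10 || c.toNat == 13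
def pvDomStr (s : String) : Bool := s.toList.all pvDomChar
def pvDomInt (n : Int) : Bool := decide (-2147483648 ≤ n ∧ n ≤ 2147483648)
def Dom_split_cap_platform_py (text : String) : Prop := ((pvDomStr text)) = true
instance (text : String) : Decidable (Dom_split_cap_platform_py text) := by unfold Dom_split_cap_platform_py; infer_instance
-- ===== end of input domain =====

-- B replaces A's find-the-split-index loop (enumerate + slice + join) by a single fold over the tokens with
-- two growing string accumulators and no split point, slicing or joining; same cost, different decomposition (objective: alternative).


-- ===== PORT A =====
-- A's for-loop over enumerate(tokens) with the cap_tokens accumulator and early return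
def splitCapLoop : List String → List String → Option String × String
  | [], caps => (some (PySem.Str.join " " caps), "")
  | t :: rest, caps =>
      if PySem.Str.len t == 1 && PySem.Str.strIsalpha t then
        splitCapLoop rest (caps ++ [t])
      else
        ((if caps.isEmpty then none else some (PySem.Str.join " " caps)),
         PySem.Str.join " " (t :: rest))

def split_cap_platform_py (text : String) : Option String × String :=
  let text := PySem.Str.strip text
  if text = "" then (none, "")
  else splitCapLoop (PySem.Str.split₀ text) []

-- ===== PORT B =====
-- B's loop body: state (caps, plat), each an Optional growing string
def altStep (st : Option String × Option String) (tok : String) : Option String × Option String :=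
  if st.2.isNone && (PySem.Str.len tok == 1 && PySem.Str.strIsalpha tok) then
    ((match st.1 with | none => some tok | some c => some (c ++ " " ++ tok)), st.2)
  else
    (st.1, (match st.2 with | none => some tok | some p => some (p ++ " " ++ tok)))

def split_cap_platform_py_alt (text : String) : Option String × String :=
  let st := (PySem.Str.split₀ (PySem.Str.strip text)).foldl altStep (none, none)
  (st.1, match st.2 with | none => "" | some p => p)

-- ===== PRECONDITION & SPEC =====
def Spec_split_cap_platform_py (text : String) (out : Option String × String) : Prop := out = split_cap_platform_py_alt text
instance (text : String) (out : Option String × String) : Decidable (Spec_split_cap_platform_py text out) := by unfold Spec_split_cap_platform_py; infer_instance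

-- ===== CLAIM (what is proved, stated in full; the proofs are below) =====
def Claim_equal_split_cap_platform_py : Prop := ∀ (text : String), Dom_split_cap_platform_py text → Spec_split_cap_platform_py text (split_cap_platform_py text)

-- ===== LEMMAS AND PROOFS =====

-- split₀'s worker returns a nonempty list whenever some input character is not whitespace
lemma split0_go_ne_nil : ∀ (s cur : List Char) (acc : List (List Char)),
    (cur ≠ [] ∨ acc ≠ [] ∨ ∃ c ∈ s, PySem.Chars.isspace c = false) →
    PySem.Chars.split₀.go s cur acc ≠ [] := by
  intro s
  induction s with
  | nil =>
      intro cur acc h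
      rcases h with h | h | ⟨c, hc, _⟩
      · simp [PySem.Chars.split₀.go, List.isEmpty_iff, h]
      · by_cases hc : cur.isEmpty <;> simp_all [PySem.Chars.split₀.go]
      · cases hc
  | cons c rest ih =>
      intro cur acc h
      by_cases hs : PySem.Chars.isspace c = true
      · by_cases hc : cur.isEmpty
        · simp only [PySem.Chars.split₀.go, hs, if_pos hc, if_true]
          apply ih
          rcases h with h | h | ⟨d, hd, hds⟩
          · exact absurd (List.isEmpty_iff.mp hc) h
          · exact Or.inr (Or.inl h)
          · rcases List.mem_cons.mp hd with hd | hd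
            · rw [hd] at hds; simp [hs] at hds
            · exact Or.inr (Or.inr ⟨d, hd, hds⟩)
        · simp only [PySem.Chars.split₀.go, hs, if_true, if_neg hc]
          apply ih
          exact Or.inr (Or.inl (by simp))
      · simp only [PySem.Chars.split₀.go, hs]
        apply ih
        exact Or.inl (by simp)

-- a non-blank stripped string splits into at least one token
lemma split0_strip_ne_nil (s : String) (h : PySem.Str.strip s ≠ "") :
    PySem.Str.split₀ (PySem.Str.strip s) ≠ [] := by
  have htl : (PySem.Str.strip s).toList ≠ [] := by
    intro he; apply h; exact String.ext (by simpa [String.toList] using he)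
  have hmem : ∃ c ∈ (PySem.Str.strip s).toList, PySem.Chars.isspace c = false := by
    rw [PySem.Str.toList_strip] at htl ⊢
    unfold PySem.Chars.strip PySem.Chars.rstrip at htl ⊢
    set X := (PySem.Chars.lstrip s.toList).reverse with hX
    have hdw : X.dropWhile PySem.Chars.isspace ≠ [] := by
      intro he; apply htl; rw [he]; rfl
    refine ⟨(X.dropWhile PySem.Chars.isspace).head hdw, ?_, ?_⟩
    · simp [List.mem_reverse, List.head_mem]
    · exact List.head_dropWhile_not _ hdw
  unfold PySem.Str.split₀
  simp only [ne_eq, List.map_eq_nil_iff]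
  unfold PySem.Chars.split₀
  exact split0_go_ne_nil _ [] [] (Or.inr (Or.inr hmem))

-- join with a separator absorbs a pre-appended first piece (char-list side)
lemma chars_join_snoc : ∀ (l : List (List Char)) (hd t sep : List Char),
    PySem.Chars.join sep ((hd :: l) ++ [t]) = PySem.Chars.join sep (hd :: l) ++ sep ++ t := by
  intro l
  induction l with
  | nil =>
      intro hd t sep
      simp [PySem.Chars.join_cons_cons, PySem.Chars.join_singleton]
  | cons q rest ih =>
      intro hd t sep
      simp only [List.cons_append, PySem.Chars.join_cons_cons]
      rw [← List.cons_append, ih q t sep]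
      simp [List.append_assoc]

-- string side: appending one more capability token onto a nonempty joined list
lemma join_snoc (caps : List String) (c t : String) :
    PySem.Str.join " " ((c :: caps) ++ [t]) = PySem.Str.join " " (c :: caps) ++ " " ++ t := by
  apply String.ext
  simp only [String.toList_append, PySem.Str.toList_join, List.map_append, List.map_cons,
    List.map_nil]
  exact chars_join_snoc (caps.map String.toList) c.toList t.toList " ".toList

-- B's left-fold of string concatenation equals a join with the seed as first piece
lemma foldl_concat_eq_join : ∀ (ts : List String) (p : String),
    ts.foldl (fun a t => a ++ " " ++ t) p = PySem.Str.join " " (p :: ts) := by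
  intro ts
  induction ts with
  | nil =>
      intro p
      apply String.ext
      simp [PySem.Str.toList_join, PySem.Chars.join_singleton]
  | cons t rest ih =>
      intro p
      simp only [List.foldl_cons]
      rw [ih (p ++ " " ++ t)]
      apply String.ext
      simp only [PySem.Str.toList_join, List.map_cons, String.toList_append]
      cases rest with
      | nil => simp [PySem.Chars.join_singleton, PySem.Chars.join_cons_cons]
      | cons r rs =>
          simp [PySem.Chars.join_cons_cons, List.append_assoc]

-- once the platform accumulator is set, B's fold only extends it
lemma foldl_altStep_plat : ∀ (ts : List String) (c : Option String) (p : String),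
    ts.foldl altStep (c, some p) = (c, some (ts.foldl (fun a t => a ++ " " ++ t) p)) := by
  intro ts
  induction ts with
  | nil => intro c p; rfl
  | cons t rest ih =>
      intro c p
      simp only [List.foldl_cons, altStep, Option.isNone_some, Bool.false_and, if_neg,
        Bool.false_eq_true, not_false_iff]
      exact ih c (p ++ " " ++ t)

-- A's loop with a nonempty accumulator is B's fold in the corresponding state
lemma splitCapLoop_eq_fold : ∀ (ts caps : List String) (c : String),
    splitCapLoop ts (c :: caps) =
      (let st := ts.foldl altStep (some (PySem.Str.join " " (c :: caps)), none)
       (st.1, match st.2 with | none => "" | some p => p)) := by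
  intro ts
  induction ts with
  | nil => intro caps c; rfl
  | cons t rest ih =>
      intro caps c
      by_cases hp : (PySem.Str.len t == 1 && PySem.Str.strIsalpha t) = true
      · simp only [splitCapLoop, hp, if_true, List.foldl_cons, altStep, Option.isNone_none,
          Bool.true_and]
        rw [List.cons_append, ih (caps ++ [t]) c, ← List.cons_append, join_snoc]
      · simp only [splitCapLoop, hp, List.foldl_cons, altStep, Option.isNone_none,
          Bool.true_and, Bool.false_eq_true, if_false]
        rw [foldl_altStep_plat, foldl_concat_eq_join]
        simp

-- ===== VERDICT (by name: the statement is the Claim_ definition above) =====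
theorem split_cap_platform_py_spec : Claim_equal_split_cap_platform_py := by
  intro text _
  unfold Spec_split_cap_platform_py split_cap_platform_py split_cap_platform_py_alt
  by_cases h : PySem.Str.strip text = ""
  · rw [h]; rfl
  · simp only [if_neg h]
    rcases htok : PySem.Str.split₀ (PySem.Str.strip text) with _ | ⟨t, rest⟩
    · exact absurd htok (split0_strip_ne_nil text h)
    · by_cases hp : (PySem.Str.len t == 1 && PySem.Str.strIsalpha t) = true
      · simp only [splitCapLoop, hp, if_true, List.foldl_cons, altStep, Option.isNone_none,
          Bool.true_and]
        have hj : PySem.Str.join " " [t] = t := by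
          apply String.ext
          simp [PySem.Str.toList_join, PySem.Chars.join_singleton]
        rw [List.nil_append, splitCapLoop_eq_fold rest [] t, hj]
      · simp only [splitCapLoop, hp, List.foldl_cons, altStep, Option.isNone_none,
          Bool.true_and, Bool.false_eq_true, if_false]
        rw [foldl_altStep_plat, foldl_concat_eq_join]
        simp
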